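-- pv_equiv track=rewrite | github.com/edoardottt/offensive-onos | onos-dm/gendata2.py | trasform
-- ===== SOURCE A (Python) =====
-- app_name = {"org.onosproject.fwd": 1, "org.edoardottt.malhosttracking.app": 2}
--
-- action_name = {"getHost": 3, "forward": 4, "appendLocation": 5, "removeLocation": 6}
--
-- def trasform(listA, listB):
--     resultA = []
--     resultB = []
--     for strelem in listA:
--         for elem in app_name:
--             strelem = strelem.replace(elem, str(app_name[elem]))
--         for elem in action_name:
--             strelem = strelem.replace(elem, str(action_name[elem]))
--         resultA.append(strelem)
--
--     for strelem in listB: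
--         for elem in app_name:
--             strelem = strelem.replace(elem, str(app_name[elem]))
--         for elem in action_name:
--             strelem = strelem.replace(elem, str(action_name[elem]))
--         resultB.append(strelem)
--
--     return (resultA, resultB)
-- ===== SOURCE B (Python) =====
-- import re
--
-- app_name = {"org.onosproject.fwd": 1, "org.edoardottt.malhosttracking.app": 2}
--
-- action_name = {"getHost": 3, "forward": 4, "appendLocation": 5, "removeLocation": 6}
--
-- _TABLE = {**app_name, **action_name}
-- _PAT = re.compile("|".join(re.escape(k) for k in _TABLE))
--
-- def trasform(listA, listB):
--     sub = lambda s: _PAT.sub(lambda m: str(_TABLE[m.group(0)]), s)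
--     return ([sub(s) for s in listA], [sub(s) for s in listB])
-- ===== Notes on version B (the rewrite author's own statement) =====
-- stated objective: idiomatic
-- what changed: Replaces six sequential whole-string str.replace passes per element with a single left-to-right re.sub pass over one merged key->code table (a compiled alternation of escaped literal keys).
import Mathlib
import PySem

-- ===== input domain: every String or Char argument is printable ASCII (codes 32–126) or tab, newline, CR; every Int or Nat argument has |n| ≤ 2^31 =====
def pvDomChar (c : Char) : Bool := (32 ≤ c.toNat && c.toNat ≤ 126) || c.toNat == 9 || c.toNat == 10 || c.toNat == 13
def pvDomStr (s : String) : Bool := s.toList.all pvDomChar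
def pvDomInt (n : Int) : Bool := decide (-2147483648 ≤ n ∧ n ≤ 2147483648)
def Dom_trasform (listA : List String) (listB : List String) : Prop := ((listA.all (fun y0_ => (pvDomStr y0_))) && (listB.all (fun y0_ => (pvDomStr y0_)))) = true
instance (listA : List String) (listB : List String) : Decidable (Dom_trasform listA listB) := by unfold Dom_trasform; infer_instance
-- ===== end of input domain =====

-- B replaces A's six sequential whole-string replace passes per element with a single
-- left-to-right scan over one merged key→code table (re.sub over an alternation of the
-- escaped literal keys); same return value, different traversal (objective: idiomatic).

-- ===== PORT A =====
-- the module-level dicts (insertion order preserved)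
def app_name : PySem.Dict String Int :=
  (PySem.Dict.empty.insert "org.onosproject.fwd" 1).insert "org.edoardottt.malhosttracking.app" 2
def action_name : PySem.Dict String Int :=
  ((((PySem.Dict.empty.insert "getHost" 3).insert "forward" 4).insert "appendLocation" 5).insert "removeLocation" 6)

-- body of A's two inner loops: 'for elem in d: strelem = strelem.replace(elem, str(d[elem]))'
-- (iterating keys and looking each key up = folding over d.items, keys being distinct)
def applyDicts (strelem : String) : String :=
  let s1 := (PySem.Dict.items app_name).foldl
    (fun st kv => PySem.Str.replace st kv.1 (PySem.Int.toStr kv.2)) strelem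
  (PySem.Dict.items action_name).foldl
    (fun st kv => PySem.Str.replace st kv.1 (PySem.Int.toStr kv.2)) s1

def trasform (listA : List String) (listB : List String) : List String × List String :=
  (listA.foldl (fun r strelem => r ++ [applyDicts strelem]) [],
   listB.foldl (fun r strelem => r ++ [applyDicts strelem]) [])

-- ===== PORT B =====
-- the merged table {**app_name, **action_name} with str(v) (each code is one char here)
def pvTable : List (List Char × Char) :=
  [("org.onosproject.fwd".toList, '1'), ("org.edoardottt.malhosttracking.app".toList, '2'),
   ("getHost".toList, '3'), ("forward".toList, '4'),
   ("appendLocation".toList, '5'), ("removeLocation".toList, '6')]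

-- one left-to-right pass: at each position the first table key that matches is replaced by
-- its code and the scan resumes after it; exactly re.sub of the literal-key alternation
-- (leftmost match, alternatives tried in table order).  On a match the tail 't.drop (len-1)'
-- is '(c :: t).drop len' (keys are nonempty), written so the recursion is on a shorter list.
def scanK (ks : List (List Char × Char)) : List Char → List Char
  | [] => []
  | c :: t =>
    match ks.find? (fun kd => kd.1.isPrefixOf (c :: t)) with
    | some kd => kd.2 :: scanK ks (t.drop (kd.1.length - 1))
    | none => c :: scanK ks t
termination_by s => s.length
decreasing_by
  all_goals simp

def subOne (s : String) : String := String.ofList (scanK pvTable s.toList)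

def trasform_alt (listA : List String) (listB : List String) : List String × List String :=
  (listA.map subOne, listB.map subOne)

-- ===== PRECONDITION & SPEC =====
def Spec_trasform (listA : List String) (listB : List String) (out : List String × List String) : Prop := out = trasform_alt listA listB
instance (listA : List String) (listB : List String) (out : List String × List String) : Decidable (Spec_trasform listA listB out) := by unfold Spec_trasform; infer_instance

-- ===== CLAIM (what is proved, stated in full; the proofs are below) =====
def Claim_equal_trasform : Prop := ∀ (listA : List String) (listB : List String), Dom_trasform listA listB → Spec_trasform listA listB (trasform listA listB)

-- ===== LEMMAS AND PROOFS =====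

-- 'replace s k [d]' written as the same leftmost-greedy scan shape as scanK
def repl (k : List Char) (d : Char) : List Char → List Char
  | [] => []
  | c :: t => if k.isPrefixOf (c :: t) then d :: repl k d (t.drop (k.length - 1)) else c :: repl k d t
termination_by s => s.length
decreasing_by
  all_goals simp

-- ordered no-overlap: an earlier key a neither occurs inside a later key b nor
-- continues past a proper suffix of b (checkable Bool form + the Prop it implies)
def noOvB (a b : List Char) : Bool :=
  (List.range b.length).all (fun p => !(a.isPrefixOf (b.drop p)) && !((b.drop p).isPrefixOf a))

def pwB : List (List Char × Char) → Bool
  | [] => true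
  | a :: t => t.all (fun b => noOvB a.1 b.1) && pwB t

def goodB (ks : List (List Char × Char)) : Bool :=
  ks.all (fun kd => !kd.1.isEmpty) &&
  ks.all (fun kd => ks.all (fun kd' => kd.1.all (fun c => c != kd'.2))) &&
  pwB ks

def NoOvStep (a b : List Char × Char) : Prop :=
  ∀ p < b.1.length, ¬ a.1 <+: b.1.drop p ∧ ¬ b.1.drop p <+: a.1

def Good (ks : List (List Char × Char)) : Prop :=
  (∀ kd ∈ ks, kd.1 ≠ []) ∧
  (∀ kd ∈ ks, ∀ kd' ∈ ks, ∀ c ∈ kd.1, c ≠ kd'.2) ∧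
  List.Pairwise NoOvStep ks

theorem noOvB_noOvStep (a b : List Char × Char) (h : noOvB a.1 b.1 = true) : NoOvStep a b := by
  intro p hp
  have := (List.all_eq_true.mp h) p (List.mem_range.mpr hp)
  simp only [Bool.and_eq_true, Bool.not_eq_true'] at this
  constructor
  · intro hpre
    have := this.1
    rw [(List.isPrefixOf_iff_prefix).symm] at hpre
    simp [hpre] at this
  · intro hpre
    have := this.2
    rw [(List.isPrefixOf_iff_prefix).symm] at hpre
    simp [hpre] at this

theorem pwB_pairwise (ks : List (List Char × Char)) (h : pwB ks = true) :
    List.Pairwise NoOvStep ks := by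
  induction ks with
  | nil => exact List.Pairwise.nil
  | cons a t ih =>
    simp only [pwB, Bool.and_eq_true] at h
    exact List.Pairwise.cons
      (fun b hb => noOvB_noOvStep a b ((List.all_eq_true.mp h.1) b hb)) (ih h.2)

theorem good_of_goodB (ks : List (List Char × Char)) (h : goodB ks = true) : Good ks := by
  simp only [goodB, Bool.and_eq_true] at h
  refine ⟨?_, ?_, pwB_pairwise ks h.2⟩
  · intro kd hkd
    have := (List.all_eq_true.mp h.1.1) kd hkd
    simpa using this
  · intro kd hkd kd' hkd' c hc
    have := (List.all_eq_true.mp ((List.all_eq_true.mp h.1.2) kd hkd)) kd' hkd'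
    have := (List.all_eq_true.mp this) c hc
    simpa using this

theorem good_table : Good pvTable :=
  good_of_goodB pvTable (by decide)

theorem go_eq (k : List Char) (d : Char) (hk : k ≠ []) :
    ∀ fuel l acc, l.length ≤ fuel →
      PySem.Chars.replace.go k [d] fuel l acc = acc.reverse ++ repl k d l := by
  intro fuel
  induction fuel with
  | zero =>
    intro l acc hl
    have : l = [] := List.eq_nil_of_length_eq_zero (Nat.le_zero.mp hl)
    subst this
    simp [PySem.Chars.replace.go, repl]
  | succ n ih =>
    intro l acc hl
    match l with
    | [] => simp [PySem.Chars.replace.go, repl]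
    | c :: t =>
      by_cases hpre : k.isPrefixOf (c :: t)
      · rcases k with _ | ⟨a, k'⟩
        · exact absurd rfl hk
        · have hdrop : (a :: k').length - 1 = k'.length := by simp
          have hlen : (t.drop k'.length).length ≤ n := by
            simp only [List.length_drop]
            simp only [List.length_cons] at hl
            omega
          rw [show PySem.Chars.replace.go (a :: k') [d] (n+1) (c :: t) acc
                = PySem.Chars.replace.go (a :: k') [d] n ((c :: t).drop (a :: k').length) ([d].reverse ++ acc)
              from by simp [PySem.Chars.replace.go, hpre]]
          have hct : (c :: t).drop (a :: k').length = t.drop k'.length := by simp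
          rw [hct, ih _ _ hlen]
          rw [show repl (a :: k') d (c :: t) = d :: repl (a :: k') d (t.drop ((a :: k').length - 1))
              from by rw [repl]; simp [hpre]]
          simp
      · rw [show PySem.Chars.replace.go k [d] (n+1) (c :: t) acc
              = PySem.Chars.replace.go k [d] n t (c :: acc)
            from by simp [PySem.Chars.replace.go, hpre]]
        have hlen : t.length ≤ n := by simp at hl; omega
        rw [ih _ _ hlen]
        rw [show repl k d (c :: t) = c :: repl k d t from by rw [repl]; simp [hpre]]
        simp

theorem replace_eq_repl (k : List Char) (d : Char) (hk : k ≠ []) (new : List Char)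
    (hnew : new = [d]) (s : List Char) :
    PySem.Chars.replace s k new = repl k d s := by
  subst hnew
  rw [PySem.Chars.replace]
  simp only [List.isEmpty_iff]
  rw [if_neg hk]
  simpa using go_eq k d hk s.length s [] (le_refl _)

theorem scanK_nil : ∀ s : List Char, scanK [] s = s := by
  intro s
  induction s with
  | nil => rw [scanK]
  | cons c t ih => rw [scanK]; simp [ih]

theorem scanK_skip (ks : List (List Char × Char)) :
    ∀ (m : Nat) (s : List Char), m ≤ s.length →
      (∀ p, p < m → ∀ kd ∈ ks, ¬ kd.1 <+: s.drop p) →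
      scanK ks s = s.take m ++ scanK ks (s.drop m) := by
  intro m
  induction m with
  | zero => intro s _ _; simp
  | succ n ih =>
    intro s hm h
    match s with
    | [] => simp at hm
    | c :: t =>
      have hnone : ks.find? (fun kd => kd.1.isPrefixOf (c :: t)) = none := by
        rw [List.find?_eq_none]
        intro kd hkd
        simp only [Bool.not_eq_true]
        rw [Bool.eq_false_iff]
        intro hpre
        exact h 0 (Nat.succ_pos n) kd hkd (by simpa using List.isPrefixOf_iff_prefix.mp hpre)
      rw [scanK, hnone]
      have ht : scanK ks t = t.take n ++ scanK ks (t.drop n) := by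
        apply ih
        · simpa using Nat.succ_le_succ_iff.mp hm
        · intro p hp kd hkd
          have := h (p+1) (Nat.succ_lt_succ hp) kd hkd
          simpa using this
      simp [ht]

theorem scanK_prefix_keep (ks : List (List Char × Char)) :
    ∀ (n : Nat) (u : List Char) (k' : List Char), u.length ≤ n → k' ≠ [] →
      (∀ c ∈ k', ∀ kd ∈ ks, c ≠ kd.2) → k' <+: scanK ks u → k' <+: u := by
  intro n
  induction n with
  | zero =>
    intro u k' hu _ _ hpre
    have : u = [] := List.eq_nil_of_length_eq_zero (Nat.le_zero.mp hu)
    subst this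
    rw [scanK] at hpre
    exact hpre
  | succ n ih =>
    intro u k' hu hne hch hpre
    match u with
    | [] => rw [scanK] at hpre; exact hpre
    | c :: t =>
      cases hf : ks.find? (fun kd => kd.1.isPrefixOf (c :: t)) with
      | some kd =>
        rw [scanK, hf] at hpre
        rcases k' with _ | ⟨a, k''⟩
        · exact absurd rfl hne
        · have := List.cons_prefix_cons.mp hpre
          exact absurd this.1 (hch a (List.mem_cons_self) kd (List.mem_of_find?_eq_some hf))
      | none =>
        rw [scanK, hf] at hpre
        rcases k' with _ | ⟨a, k''⟩
        · exact absurd rfl hne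
        · obtain ⟨hac, hpre'⟩ := List.cons_prefix_cons.mp hpre
          subst hac
          by_cases hk'' : k'' = []
          · subst hk''
            simp
          · have : k'' <+: t := by
              apply ih t k'' (by simpa using Nat.succ_le_succ_iff.mp hu) hk''
              · intro x hx kd hkd
                exact hch x (List.mem_cons_of_mem _ hx) kd hkd
              · exact hpre'
            exact List.cons_prefix_cons.mpr ⟨rfl, this⟩

theorem step (ks : List (List Char × Char)) (k : List Char) (d : Char)
    (hG : Good (ks ++ [(k, d)])) :
    ∀ (n : Nat) (s : List Char), s.length ≤ n →
      repl k d (scanK ks s) = scanK (ks ++ [(k, d)]) s := by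
  obtain ⟨hGne, hGch, hGpw⟩ := hG
  have hkne : k ≠ [] := hGne (k, d) (List.mem_append_right _ (List.mem_singleton.mpr rfl))
  have hkch : ∀ c ∈ k, ∀ kd' ∈ ks, c ≠ kd'.2 := by
    intro c hc kd' hkd'
    exact hGch (k, d) (List.mem_append_right _ (List.mem_singleton.mpr rfl)) kd'
      (List.mem_append_left _ hkd') c hc
  have hov : ∀ kd ∈ ks, NoOvStep kd (k, d) := by
    intro kd hkd
    exact ((List.pairwise_append.mp hGpw).2.2) kd hkd (k, d) (List.mem_singleton.mpr rfl)
  intro n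
  induction n with
  | zero =>
    intro s hs
    have : s = [] := List.eq_nil_of_length_eq_zero (Nat.le_zero.mp hs)
    subst this
    rw [scanK, scanK, repl]
  | succ n ih =>
    intro s hs
    match s with
    | [] => rw [scanK, scanK, repl]
    | c :: t =>
      cases hf : ks.find? (fun kd => kd.1.isPrefixOf (c :: t)) with
      | some kd₀ =>
        have hf' : (ks ++ [(k, d)]).find? (fun kd => kd.1.isPrefixOf (c :: t)) = some kd₀ := by
          rw [List.find?_append, hf]; rfl
        rw [scanK, hf, scanK, hf']
        have hnotpre : k.isPrefixOf (kd₀.2 :: scanK ks (t.drop (kd₀.1.length - 1))) = false := by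
          rw [Bool.eq_false_iff]
          intro hpre
          rcases k with _ | ⟨a, k''⟩
          · exact absurd rfl hkne
          · have := (List.cons_prefix_cons.mp (List.isPrefixOf_iff_prefix.mp hpre)).1
            exact hkch a (List.mem_cons_self) kd₀ (List.mem_of_find?_eq_some hf) this
        rw [repl]
        rw [if_neg (by simp [hnotpre])]
        have hlen : (t.drop (kd₀.1.length - 1)).length ≤ n := by
          simp only [List.length_drop]
          simp only [List.length_cons] at hs
          omega
        rw [ih _ hlen]
      | none =>
        by_cases hk : k.isPrefixOf (c :: t)
        · -- the new key matches here; earlier keys cannot match inside its span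
          have hf' : (ks ++ [(k, d)]).find? (fun kd => kd.1.isPrefixOf (c :: t)) = some (k, d) := by
            rw [List.find?_append, hf]
            simp [List.find?, hk]
          have hkpre : k <+: (c :: t) := List.isPrefixOf_iff_prefix.mp hk
          obtain ⟨r, hr⟩ := hkpre
          have hklen : k.length ≤ (c :: t).length := by
            rw [← hr]; simp
          have hskip : scanK ks (c :: t) = (c :: t).take k.length ++ scanK ks ((c :: t).drop k.length) := by
            apply scanK_skip ks k.length (c :: t) hklen
            intro p hp kd hkd hkd_pre
            have hdropp : (c :: t).drop p = k.drop p ++ r := by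
              rw [← hr, List.drop_append_of_le_length (Nat.le_of_lt hp)]
            rw [hdropp] at hkd_pre
            have hdp : k.drop p <+: k.drop p ++ r := List.prefix_append _ _
            rcases Nat.le_total kd.1.length (k.drop p).length with hle | hle
            · exact (hov kd hkd p hp).1 (List.prefix_of_prefix_length_le hkd_pre hdp hle)
            · exact (hov kd hkd p hp).2 (List.prefix_of_prefix_length_le hdp hkd_pre hle)
          have htake : (c :: t).take k.length = k := by
            rw [← hr, List.take_left']
            rfl
          rw [hskip, htake]
          rcases k with _ | ⟨a, k''⟩
          · exact absurd rfl hkne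
          · rw [List.cons_append, repl]
            rw [if_pos (by
              apply List.isPrefixOf_iff_prefix.mpr
              exact List.cons_prefix_cons.mpr ⟨rfl, List.prefix_append _ _⟩)]
            have hdrop2 : ((k'' ++ scanK ks ((c :: t).drop (a :: k'').length)).drop ((a :: k'').length - 1))
                = scanK ks ((c :: t).drop (a :: k'').length) := by
              simp
            rw [hdrop2]
            have hlen2 : ((c :: t).drop (a :: k'').length).length ≤ n := by
              simp only [List.length_drop]
              simp only [List.length_cons] at hs ⊢
              omega
            rw [ih _ hlen2, scanK, hf']
            simp
        · have hf' : (ks ++ [(k, d)]).find? (fun kd => kd.1.isPrefixOf (c :: t)) = none := by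
            rw [List.find?_append, hf]
            simp [List.find?, hk]
          rw [scanK, hf, scanK, hf']
          have hnotpre : k.isPrefixOf (c :: scanK ks t) = false := by
            rw [Bool.eq_false_iff]
            intro hpre
            have h1 : c :: scanK ks t = scanK ks (c :: t) := by rw [scanK, hf]
            rw [h1] at hpre
            have h2 : k <+: (c :: t) :=
              scanK_prefix_keep ks (c :: t).length (c :: t) k (le_refl _) hkne hkch
                (List.isPrefixOf_iff_prefix.mp hpre)
            exact absurd (List.isPrefixOf_iff_prefix.mpr h2) (by simp [hk])
          rw [repl, if_neg (by simp [hnotpre])]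
          have hlen : t.length ≤ n := by simp at hs; omega
          rw [ih _ hlen]

theorem good_prefix (ks : List (List Char × Char)) (x : List Char × Char)
    (h : Good (ks ++ [x])) : Good ks := by
  obtain ⟨h1, h2, h3⟩ := h
  refine ⟨?_, ?_, (List.pairwise_append.mp h3).1⟩
  · intro kd hkd; exact h1 kd (List.mem_append_left _ hkd)
  · intro kd hkd kd' hkd' c hc
    exact h2 kd (List.mem_append_left _ hkd) kd' (List.mem_append_left _ hkd') c hc

theorem seq_eq_scan : ∀ (ks : List (List Char × Char)), Good ks →
    ∀ s, ks.foldl (fun a kd => repl kd.1 kd.2 a) s = scanK ks s := by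
  intro ks
  induction ks using List.reverseRecOn with
  | nil => intro _ s; simpa using (scanK_nil s).symm
  | append_singleton ks x ih =>
    intro hG s
    rw [List.foldl_append]
    simp only [List.foldl_cons, List.foldl_nil]
    rw [ih (good_prefix ks x hG) s]
    exact step ks x.1 x.2 (by simpa using hG) s.length s (le_refl _)

theorem perString (s : String) : applyDicts s = subOne s := by
  have h1 : PySem.Dict.items app_name
      = [("org.onosproject.fwd", (1 : Int)), ("org.edoardottt.malhosttracking.app", 2)] := rfl
  have h2 : PySem.Dict.items action_name
      = [("getHost", (3 : Int)), ("forward", 4), ("appendLocation", 5), ("removeLocation", 6)] := rfl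
  have hA : applyDicts s = String.ofList
      (repl "removeLocation".toList '6' (repl "appendLocation".toList '5'
        (repl "forward".toList '4' (repl "getHost".toList '3'
          (repl "org.edoardottt.malhosttracking.app".toList '2'
            (repl "org.onosproject.fwd".toList '1' s.toList)))))) := by
    simp only [applyDicts, h1, h2, List.foldl_cons, List.foldl_nil]
    simp only [PySem.Str.replace, String.toList_ofList]
    rw [replace_eq_repl "org.onosproject.fwd".toList '1' (by decide) (PySem.Int.toStr 1).toList rfl,
        replace_eq_repl "org.edoardottt.malhosttracking.app".toList '2' (by decide) (PySem.Int.toStr 2).toList rfl,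
        replace_eq_repl "getHost".toList '3' (by decide) (PySem.Int.toStr 3).toList rfl,
        replace_eq_repl "forward".toList '4' (by decide) (PySem.Int.toStr 4).toList rfl,
        replace_eq_repl "appendLocation".toList '5' (by decide) (PySem.Int.toStr 5).toList rfl,
        replace_eq_repl "removeLocation".toList '6' (by decide) (PySem.Int.toStr 6).toList rfl]
  rw [hA]
  unfold subOne
  congr 1
  have h := seq_eq_scan pvTable good_table s.toList
  simp only [pvTable, List.foldl_cons, List.foldl_nil] at h
  unfold pvTable
  exact h

-- ===== VERDICT (by name: the statement is the Claim_ definition above) =====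
theorem trasform_spec : Claim_equal_trasform := by
  intro listA listB _
  show trasform listA listB = trasform_alt listA listB
  unfold trasform trasform_alt
  rw [PySem.List.foldl_append_singleton_eq_map, PySem.List.foldl_append_singleton_eq_map]
  simp [perString]
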